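-- pv_equiv track=rewrite | github.com/bodesuto/Paper1 | knowledge_graph/src/insert_obs_data.py | _concepts_for_text
-- ===== SOURCE A (Python) =====
-- from typing import Iterable, Dict, Any
--
-- def _concepts_for_text(text: str, weak_concepts: list[Dict[str, str]]) -> list[Dict[str, str]]:
--     lowered = text.lower()
--     matched = []
--     for concept in weak_concepts:
--         name = str(concept.get("name", "")).strip().lower()
--         if name and name in lowered:
--             matched.append(concept)
--     return matched or weak_concepts[:2]
-- ===== SOURCE B (Python) =====
-- def _concepts_for_text(text, weak_concepts):
--     # Text-major scan: walk the text once, collecting into a set every concept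
--     # name that starts at some position; then filter the concepts by that set.
--     lowered = text.lower()
--     keys = [str(c.get("name", "")).strip().lower() for c in weak_concepts]
--     found = set()
--     for i in range(len(lowered)):
--         for k in keys:
--             if k and k not in found and lowered[i:i + len(k)] == k:
--                 found.add(k)
--     matched = [c for c, k in zip(weak_concepts, keys) if k in found]
--     return matched if matched else weak_concepts[:2]
-- ===== Notes on version B (the rewrite author's own statement) =====
-- stated objective: alternative
-- what changed: A scans concept-major (one substring search per concept over the whole text); B scans text-major: a single sweep over the text positions fills a set of names that occur, and the concepts are then filtered by set membership.
import Mathlib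
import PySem

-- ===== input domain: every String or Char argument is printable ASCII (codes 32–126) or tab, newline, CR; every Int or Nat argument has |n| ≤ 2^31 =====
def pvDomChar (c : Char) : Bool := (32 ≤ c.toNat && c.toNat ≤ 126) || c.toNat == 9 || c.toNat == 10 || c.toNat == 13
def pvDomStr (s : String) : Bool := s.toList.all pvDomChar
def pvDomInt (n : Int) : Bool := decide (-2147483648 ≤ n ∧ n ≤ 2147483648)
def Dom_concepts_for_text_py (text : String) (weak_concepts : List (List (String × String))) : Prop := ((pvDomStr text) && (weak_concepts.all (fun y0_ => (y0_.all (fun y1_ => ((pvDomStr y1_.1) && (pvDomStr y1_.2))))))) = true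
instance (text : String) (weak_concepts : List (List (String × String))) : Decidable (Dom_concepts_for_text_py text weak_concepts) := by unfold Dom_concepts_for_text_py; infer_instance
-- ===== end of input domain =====

-- B replaces A's concept-major loop (one substring search per concept) by a text-major sweep
-- that collects the occurring names into a set and then filters the concepts by membership.


-- ===== PORT A =====
def concepts_for_text_py (text : String) (weak_concepts : List (List (String × String))) : List (List (String × String)) :=
  let lowered := PySem.Str.lower text
  let matched := weak_concepts.foldl (fun matched concept =>
    let name := PySem.Str.lower (PySem.Str.strip ((PySem.Dict.mk concept).getD "name" ""))
    if name ≠ "" ∧ PySem.Str.isIn name lowered = true then matched ++ [concept] else matched) []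
  if matched ≠ [] then matched else PySem.List.slice weak_concepts none (some 2)

-- ===== PORT B =====
-- str(c.get("name", "")).strip().lower()  (the body of Source B's key comprehension)
def pvKeyB (c : List (String × String)) : String :=
  PySem.Str.lower (PySem.Str.strip ((PySem.Dict.mk c).getD "name" ""))

def concepts_for_text_py_alt (text : String) (weak_concepts : List (List (String × String))) : List (List (String × String)) :=
  let lowered := PySem.Str.lower text
  let keys := weak_concepts.map pvKeyB
  let found := (PySem.List.pyRange 0 (PySem.Str.len lowered) 1).foldl (fun found i =>
      keys.foldl (fun found k =>
        if k ≠ "" ∧ ¬ PySem.Set.contains found k = true ∧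
            PySem.Str.slice lowered (some i) (some (i + PySem.Str.len k)) = k
        then PySem.Set.add found k else found) found)
    PySem.Set.empty
  let matched := ((weak_concepts.zip keys).filter (fun p => PySem.Set.contains found p.2)).map Prod.fst
  if matched ≠ [] then matched else PySem.List.slice weak_concepts none (some 2)

-- ===== PRECONDITION & SPEC =====
def Spec_concepts_for_text_py (text : String) (weak_concepts : List (List (String × String))) (out : List (List (String × String))) : Prop := out = concepts_for_text_py_alt text weak_concepts
instance (text : String) (weak_concepts : List (List (String × String))) (out : List (List (String × String))) : Decidable (Spec_concepts_for_text_py text weak_concepts out) := by unfold Spec_concepts_for_text_py; infer_instance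

-- ===== CLAIM (what is proved, stated in full; the proofs are below) =====
def Claim_equal_concepts_for_text_py : Prop := ∀ (text : String) (weak_concepts : List (List (String × String))), Dom_concepts_for_text_py text weak_concepts → Spec_concepts_for_text_py text weak_concepts (concepts_for_text_py text weak_concepts)

-- ===== LEMMAS AND PROOFS =====

-- the 'name occurs at position i' test B performs
def pvMatchAt (lowered k : String) (i : Int) : Prop :=
  PySem.Str.slice lowered (some i) (some (i + PySem.Str.len k)) = k

theorem pvMatchAt_iff (lowered k : String) (j : Nat) :
    pvMatchAt lowered k (j : Int) ↔ k.toList <+: lowered.toList.drop j := by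
  unfold pvMatchAt
  rw [← String.toList_inj, PySem.Str.toList_slice, PySem.Chars.slice_eq_listSlice,
    PySem.Str.len_eq, PySem.List.slice_natCast_add, List.prefix_iff_eq_take, eq_comm]

-- one step of B's inner loop, as a set-membership fact
theorem pvStep_mem (lowered : String) (i : Int) (fnd : PySem.Set String) (k x : String) :
    (x ∈ if k ≠ "" ∧ ¬ PySem.Set.contains fnd k = true ∧
            PySem.Str.slice lowered (some i) (some (i + PySem.Str.len k)) = k
        then PySem.Set.add fnd k else fnd) ↔
      x ∈ fnd ∨ (x = k ∧ k ≠ "" ∧ pvMatchAt lowered k i) := by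
  unfold pvMatchAt
  split_ifs with h
  · rw [PySem.Set.mem_add]
    tauto
  · push_neg at h
    constructor
    · tauto
    · rintro (hx | ⟨rfl, hne, hm⟩)
      · exact hx
      · by_cases hc : PySem.Set.contains fnd x = true
        · exact (PySem.Set.contains_iff fnd x).mp hc
        · exact absurd hm (h hne hc)

-- B's inner loop over the key list
theorem pvInner_mem (lowered : String) (i : Int) (keys : List String) (fnd : PySem.Set String) (x : String) :
    (x ∈ keys.foldl (fun found k =>
        if k ≠ "" ∧ ¬ PySem.Set.contains found k = true ∧
            PySem.Str.slice lowered (some i) (some (i + PySem.Str.len k)) = k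
        then PySem.Set.add found k else found) fnd) ↔
      x ∈ fnd ∨ (x ∈ keys ∧ x ≠ "" ∧ pvMatchAt lowered x i) := by
  induction keys generalizing fnd with
  | nil => simp
  | cons k ks ih =>
    rw [List.foldl_cons, ih, pvStep_mem]
    simp only [List.mem_cons]
    constructor
    · rintro ((hx | ⟨rfl, h1, h2⟩) | ⟨hks, h1, h2⟩) <;> tauto
    · rintro (hx | ⟨(rfl | hks), h1, h2⟩) <;> tauto

-- B's outer loop over the text positions
theorem pvOuter_mem (lowered : String) (keys : List String) (is : List Int) (fnd : PySem.Set String) (x : String) :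
    (x ∈ is.foldl (fun found i =>
        keys.foldl (fun found k =>
          if k ≠ "" ∧ ¬ PySem.Set.contains found k = true ∧
              PySem.Str.slice lowered (some i) (some (i + PySem.Str.len k)) = k
          then PySem.Set.add found k else found) found) fnd) ↔
      x ∈ fnd ∨ (x ∈ keys ∧ x ≠ "" ∧ ∃ i ∈ is, pvMatchAt lowered x i) := by
  induction is generalizing fnd with
  | nil => simp
  | cons i is ih =>
    rw [List.foldl_cons, ih, pvInner_mem]
    simp only [List.mem_cons]
    constructor
    · rintro (⟨hx | ⟨hk, h1, h2⟩⟩ | ⟨hk, h1, j, hj, h2⟩)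
      · exact Or.inl hx
      · exact Or.inr ⟨hk, h1, i, Or.inl rfl, h2⟩
      · exact Or.inr ⟨hk, h1, j, Or.inr hj, h2⟩
    · rintro (hx | ⟨hk, h1, j, (rfl | hj), h2⟩)
      · exact Or.inl (Or.inl hx)
      · exact Or.inl (Or.inr ⟨hk, h1, h2⟩)
      · exact Or.inr ⟨hk, h1, j, hj, h2⟩

-- membership in B's finished set = A's per-concept test
theorem pvFound_iff (lowered : String) (keys : List String) (x : String) (hx : x ∈ keys) :
    (x ∈ (PySem.List.pyRange 0 (PySem.Str.len lowered) 1).foldl (fun found i =>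
        keys.foldl (fun found k =>
          if k ≠ "" ∧ ¬ PySem.Set.contains found k = true ∧
              PySem.Str.slice lowered (some i) (some (i + PySem.Str.len k)) = k
          then PySem.Set.add found k else found) found) PySem.Set.empty) ↔
      x ≠ "" ∧ PySem.Str.isIn x lowered = true := by
  rw [pvOuter_mem]
  have hempty : (x ∈ (PySem.Set.empty : PySem.Set String)) = False := by
    simp [PySem.Set.empty]
  rw [PySem.Str.isIn_eq, ← PySem.Chars.exists_prefix_drop_iff_isIn]
  constructor
  · rintro (h | ⟨-, h1, i, hi, h2⟩)
    · rw [hempty] at h; exact h.elim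
    · refine ⟨h1, ?_⟩
      rw [PySem.List.mem_pyRange_one] at hi
      obtain ⟨hi0, _⟩ := hi
      obtain ⟨j, rfl⟩ := Int.eq_ofNat_of_zero_le hi0
      exact ⟨j, (pvMatchAt_iff lowered x j).mp h2⟩
  · rintro ⟨h1, j, hj⟩
    refine Or.inr ⟨hx, h1, (j : Int), ?_, (pvMatchAt_iff lowered x j).mpr hj⟩
    rw [PySem.List.mem_pyRange_one, PySem.Str.len_eq]
    refine ⟨Int.natCast_nonneg j, ?_⟩
    by_contra hge
    push_neg at hge
    have hlen : lowered.toList.length ≤ j := by exact_mod_cast hge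
    rw [List.drop_eq_nil_of_le hlen, List.prefix_nil] at hj
    exact h1 (by rw [← String.toList_inj, hj]; rfl)

-- Source B's '[c for c, k in zip(cs, map(f, cs)) if q(k)]' is a filter on the key of each concept
theorem pvZipFilter {α β : Type} (f : α → β) (q : β → Bool) (l : List α) :
    ((l.zip (l.map f)).filter (fun p => q p.2)).map Prod.fst
      = l.filter (fun c => q (f c)) := by
  induction l with
  | nil => rfl
  | cons c cs ih =>
    simp only [List.map_cons, List.zip_cons_cons, List.filter_cons]
    by_cases h : q (f c) = true <;> simp [h, ih]

theorem pvDecideEq {P : Prop} [Decidable P] {b : Bool} (h : b = true ↔ P) : decide P = b := by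
  cases b <;> simp_all

-- given ANY set F whose membership is A's per-concept test, the two result expressions agree
theorem pvAssemble (text : String) (weak_concepts : List (List (String × String)))
    (F : PySem.Set String)
    (hF : ∀ x, x ∈ weak_concepts.map pvKeyB →
      (PySem.Set.contains F x = true ↔
        (x ≠ "" ∧ PySem.Str.isIn x (PySem.Str.lower text) = true))) :
    (if weak_concepts.foldl (fun matched concept =>
        let name := PySem.Str.lower (PySem.Str.strip ((PySem.Dict.mk concept).getD "name" ""))
        if name ≠ "" ∧ PySem.Str.isIn name (PySem.Str.lower text) = true
        then matched ++ [concept] else matched) [] ≠ []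
      then weak_concepts.foldl (fun matched concept =>
        let name := PySem.Str.lower (PySem.Str.strip ((PySem.Dict.mk concept).getD "name" ""))
        if name ≠ "" ∧ PySem.Str.isIn name (PySem.Str.lower text) = true
        then matched ++ [concept] else matched) []
      else PySem.List.slice weak_concepts none (some 2))
    = (if ((weak_concepts.zip (weak_concepts.map pvKeyB)).filter
            (fun p => PySem.Set.contains F p.2)).map Prod.fst ≠ []
      then ((weak_concepts.zip (weak_concepts.map pvKeyB)).filter
            (fun p => PySem.Set.contains F p.2)).map Prod.fst
      else PySem.List.slice weak_concepts none (some 2)) := by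
  rw [PySem.List.foldl_append_ite_eq_filter
      (fun concept => PySem.Str.lower (PySem.Str.strip ((PySem.Dict.mk concept).getD "name" "")) ≠ "" ∧
        PySem.Str.isIn (PySem.Str.lower (PySem.Str.strip ((PySem.Dict.mk concept).getD "name" "")))
          (PySem.Str.lower text) = true),
    List.nil_append, pvZipFilter pvKeyB (fun k => PySem.Set.contains F k)]
  have hm : List.filter (fun x => decide
        (PySem.Str.lower (PySem.Str.strip ((PySem.Dict.mk x).getD "name" "")) ≠ "" ∧
          PySem.Str.isIn (PySem.Str.lower (PySem.Str.strip ((PySem.Dict.mk x).getD "name" "")))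
            (PySem.Str.lower text) = true)) weak_concepts
      = List.filter (fun x => PySem.Set.contains F (pvKeyB x)) weak_concepts :=
    List.filter_congr (fun x hx => pvDecideEq (hF (pvKeyB x) (List.mem_map_of_mem hx)))
  rw [hm]

theorem pvMain (text : String) (weak_concepts : List (List (String × String))) :
    concepts_for_text_py text weak_concepts = concepts_for_text_py_alt text weak_concepts := by
  unfold concepts_for_text_py concepts_for_text_py_alt
  refine pvAssemble text weak_concepts _ ?_
  intro x hx
  rw [PySem.Set.contains_iff]
  exact pvFound_iff (PySem.Str.lower text) (weak_concepts.map pvKeyB) x hx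

-- ===== VERDICT (by name: the statement is the Claim_ definition above) =====
theorem concepts_for_text_py_spec : Claim_equal_concepts_for_text_py := by
  intro text weak_concepts _
  unfold Spec_concepts_for_text_py
  exact pvMain text weak_concepts
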